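-- pv_equiv track=rewrite | github.com/yxyHeart/log-analysis | rag-service/app/services/chunking.py | _find_nearest_boundary
-- ===== SOURCE A (Python) =====
-- def _find_nearest_boundary(text: str, pos: int) -> int:
--     """Find nearest paragraph or sentence boundary near pos."""
--     # Look for newline within ±100 chars
--     for delta in range(0, 200):
--         for p in [pos + delta, pos - delta]:
--             if 0 < p < len(text) and text[p] == '\n':
--                 return p
--     # Look for sentence end
--     for delta in range(0, 200):
--         for p in [pos + delta, pos - delta]:
--             if 0 < p < len(text) and text[p] in '.!?' and p + 1 < len(text) and text[p + 1] == ' ':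
--                 return p + 1
--     return pos
-- ===== SOURCE B (Python) =====
-- def _find_nearest_boundary(text: str, pos: int) -> int:
--     """Find nearest paragraph or sentence boundary near pos."""
--     n = len(text)
--
--     def scan(match, ps):
--         return next((p for p in ps if 0 < p < n and match(p)), None)
--
--     def nearest(match):
--         r = scan(match, range(pos, pos + 200))
--         l = scan(match, range(pos, pos - 200, -1))
--         if r is None:
--             return l
--         if l is None or r - pos <= pos - l:
--             return r
--         return l
--
--     p = nearest(lambda p: text[p] == '\n')
--     if p is not None:
--         return p
--     p = nearest(lambda p: text[p] in '.!?' and p + 1 < n and text[p + 1] == ' ')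
--     return p + 1 if p is not None else pos
-- ===== Notes on version B (the rewrite author's own statement) =====
-- stated objective: alternative
-- what changed: Replaced A's interleaved expanding search (delta 0..199, checking pos+delta then pos-delta) by two independent directional scans (rightward and leftward from pos) per phase, combined by picking the closer hit with ties going right.
import Mathlib
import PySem

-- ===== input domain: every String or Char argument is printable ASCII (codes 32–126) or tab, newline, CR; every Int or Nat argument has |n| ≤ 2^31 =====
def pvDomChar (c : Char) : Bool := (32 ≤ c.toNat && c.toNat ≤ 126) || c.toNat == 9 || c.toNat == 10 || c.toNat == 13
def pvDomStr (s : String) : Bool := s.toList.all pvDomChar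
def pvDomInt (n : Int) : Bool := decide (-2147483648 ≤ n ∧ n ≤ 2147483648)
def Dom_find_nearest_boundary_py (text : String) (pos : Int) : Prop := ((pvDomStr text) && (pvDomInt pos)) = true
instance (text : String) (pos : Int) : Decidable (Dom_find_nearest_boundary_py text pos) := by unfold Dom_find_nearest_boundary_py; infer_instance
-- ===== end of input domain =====

-- B replaces A's interleaved expanding search by two directional scans combined by
-- distance (ties to the right); same cost, alternative decomposition.
-- ===== PORT A =====
-- shared hit predicates: the loop-body conditions both Pythons test literally
def pvHitNl (cs : List Char) (p : Int) : Bool :=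
  decide (0 < p) && decide (p < (cs.length : Int)) && (PySem.List.pyGet? cs p == some '\n')

def pvHitSent (cs : List Char) (p : Int) : Bool :=
  decide (0 < p) && decide (p < (cs.length : Int)) &&
    ((PySem.List.pyGet? cs p == some '.') || (PySem.List.pyGet? cs p == some '!') ||
      (PySem.List.pyGet? cs p == some '?')) &&
    decide (p + 1 < (cs.length : Int)) && (PySem.List.pyGet? cs (p + 1) == some ' ')

-- A's nested loop: 'for delta in range(0,200): for p in [pos+delta, pos-delta]: if hit p: return p'
def pvScanA (hit : Int → Bool) (pos : Int) : Option Int :=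
  (PySem.List.pyRange 0 200 1).findSome? (fun d =>
    [pos + d, pos - d].findSome? (fun p => if hit p then some p else none))

def find_nearest_boundary_py (text : String) (pos : Int) : Int :=
  let cs := text.toList
  match pvScanA (pvHitNl cs) pos with
  | some p => p
  | none =>
    match pvScanA (pvHitSent cs) pos with
    | some p => p + 1
    | none => pos

-- ===== PORT B =====
-- Source B's 'scan': first p in ps with hit p (the 0<p<n bound lives inside the hit predicate)
def pvScanDir (hit : Int → Bool) (ps : List Int) : Option Int :=
  ps.findSome? (fun p => if hit p then some p else none)

-- Source B's 'nearest': rightward and leftward scan, pick the closer hit, ties to the right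
def pvNearest (hit : Int → Bool) (pos : Int) : Option Int :=
  let r := pvScanDir hit (PySem.List.pyRange pos (pos + 200) 1)
  let l := pvScanDir hit (PySem.List.pyRange pos (pos - 200) (-1))
  match r, l with
  | none, o => o
  | some r', none => some r'
  | some r', some l' => if r' - pos ≤ pos - l' then some r' else some l'

def find_nearest_boundary_py_alt (text : String) (pos : Int) : Int :=
  let cs := text.toList
  match pvNearest (pvHitNl cs) pos with
  | some p => p
  | none =>
    match pvNearest (pvHitSent cs) pos with
    | some p => p + 1
    | none => pos

-- ===== PRECONDITION & SPEC =====
def Spec_find_nearest_boundary_py (text : String) (pos : Int) (out : Int) : Prop := out = find_nearest_boundary_py_alt text pos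
instance (text : String) (pos : Int) (out : Int) : Decidable (Spec_find_nearest_boundary_py text pos out) := by unfold Spec_find_nearest_boundary_py; infer_instance

-- ===== CLAIM (what is proved, stated in full; the proofs are below) =====
def Claim_equal_find_nearest_boundary_py : Prop := ∀ (text : String) (pos : Int), Dom_find_nearest_boundary_py text pos → Spec_find_nearest_boundary_py text pos (find_nearest_boundary_py text pos)

-- ===== LEMMAS AND PROOFS =====

-- B's combine step, as a named function (pvNearest's match), for the proofs
def pvComb (pos : Int) : Option Int → Option Int → Option Int
  | none, o => o
  | some r, none => some r
  | some r, some l => if r - pos ≤ pos - l then some r else some l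

theorem pvNearest_eq_comb (hit : Int → Bool) (pos : Int) :
    pvNearest hit pos
      = pvComb pos (pvScanDir hit (PySem.List.pyRange pos (pos + 200) 1))
                   (pvScanDir hit (PySem.List.pyRange pos (pos - 200) (-1))) := by
  unfold pvNearest pvComb
  cases pvScanDir hit (PySem.List.pyRange pos (pos + 200) 1) <;>
    cases pvScanDir hit (PySem.List.pyRange pos (pos - 200) (-1)) <;> rfl

-- core: the interleaved expanding search over increasing deltas equals the
-- combine of the two directional searches over the same deltas
theorem pv_interleave (hit : Int → Bool) (pos : Int) :
    ∀ ds : List Int, ds.Pairwise (· < ·) →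
      ds.findSome? (fun d => [pos + d, pos - d].findSome?
          (fun p => if hit p then some p else none))
        = pvComb pos
            (ds.findSome? (fun d => if hit (pos + d) then some (pos + d) else none))
            (ds.findSome? (fun d => if hit (pos - d) then some (pos - d) else none)) := by
  intro ds
  induction ds with
  | nil => intro _; rfl
  | cons d rest ih =>
    intro hpw
    rw [List.pairwise_cons] at hpw
    obtain ⟨hlt, hpw'⟩ := hpw
    by_cases h1 : hit (pos + d) = true
    · simp only [List.findSome?, h1, if_pos]
      by_cases h2 : hit (pos - d) = true
      · simp [pvComb, h2]
      · simp only [Bool.not_eq_true] at h2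
        simp only [h2, Bool.false_eq_true, if_false]
        cases hL : rest.findSome? (fun d => if hit (pos - d) then some (pos - d) else none) with
        | none => rfl
        | some l =>
          obtain ⟨d', hd', hfd⟩ := List.exists_of_findSome?_eq_some hL
          have hdd' : d < d' := hlt d' hd'
          by_cases h3 : hit (pos - d') = true
          · simp only [h3, if_pos, Option.some.injEq] at hfd
            subst hfd
            simp [pvComb]
            omega
          · simp [h3] at hfd
    · simp only [Bool.not_eq_true] at h1
      by_cases h2 : hit (pos - d) = true
      · simp only [List.findSome?, h1, h2, Bool.false_eq_true, if_false, if_pos]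
        cases hR : rest.findSome? (fun d => if hit (pos + d) then some (pos + d) else none) with
        | none => rfl
        | some r =>
          obtain ⟨d', hd', hfd⟩ := List.exists_of_findSome?_eq_some hR
          have hdd' : d < d' := hlt d' hd'
          by_cases h3 : hit (pos + d') = true
          · simp only [h3, if_pos, Option.some.injEq] at hfd
            subst hfd
            simp [pvComb]
            omega
          · simp [h3] at hfd
      · simp only [Bool.not_eq_true] at h2
        simp only [List.findSome?, h1, h2, Bool.false_eq_true, if_false]
        exact ih hpw'

-- the two directional pyRanges of B are the delta range of A, shifted
set_option maxRecDepth 8000 in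
theorem pv_scan_right (hit : Int → Bool) (pos : Int) :
    pvScanDir hit (PySem.List.pyRange pos (pos + 200) 1)
      = (PySem.List.pyRange 0 200 1).findSome?
          (fun d => if hit (pos + d) then some (pos + d) else none) := by
  unfold pvScanDir
  rw [PySem.List.pyRange_one, PySem.List.pyRange_one]
  simp only [List.findSome?_map]
  have h : (pos + 200 - pos).toNat = ((200:Int) - 0).toNat := by norm_num
  rw [h]
  rfl

set_option maxRecDepth 8000 in
theorem pv_scan_left (hit : Int → Bool) (pos : Int) :
    pvScanDir hit (PySem.List.pyRange pos (pos - 200) (-1))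
      = (PySem.List.pyRange 0 200 1).findSome?
          (fun d => if hit (pos - d) then some (pos - d) else none) := by
  unfold pvScanDir
  rw [PySem.List.pyRange_neg_one, PySem.List.pyRange_one]
  simp only [List.findSome?_map]
  have h : (pos - (pos - 200)).toNat = ((200:Int) - 0).toNat := by norm_num
  rw [h]
  rfl

theorem pvNearest_eq_scanA (hit : Int → Bool) (pos : Int) :
    pvNearest hit pos = pvScanA hit pos := by
  rw [pvNearest_eq_comb, pv_scan_right, pv_scan_left, pvScanA,
    pv_interleave hit pos _ (PySem.List.pairwise_lt_pyRange_one 0 200)]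

-- ===== VERDICT (by name: the statement is the Claim_ definition above) =====
theorem find_nearest_boundary_py_spec : Claim_equal_find_nearest_boundary_py := by
  intro text pos _
  unfold Spec_find_nearest_boundary_py find_nearest_boundary_py find_nearest_boundary_py_alt
  simp only [pvNearest_eq_scanA]
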